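-- pv_equiv track=rewrite | github.com/yoanbello/Challenge-Books-and-Pages | challenge_books_and_pages.py | solution
-- ===== SOURCE A (Python) =====
-- def solution(actual_page, left_pages):
--     temp_left_pages = left_pages - len(str(actual_page))
--     if temp_left_pages<=0:
--         last_page = actual_page
--         return last_page
--     else:
--         while temp_left_pages>0:
--             actual_page = actual_page + 1
--             temp_left_pages = temp_left_pages - len(str(actual_page))
--             if temp_left_pages == 0:
--                 last_page = actual_page
--                 return last_page
--             elif temp_left_pages < 0:
--                 last_page = actual_page - 1
--                 return last_page
-- ===== SOURCE B (Python) =====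
-- def solution(actual_page, left_pages):
--     # Consume pages block-by-block: all pages with the same digit count in one
--     # arithmetic step, O(log(answer)) iterations instead of one per page.
--     remaining = left_pages - len(str(actual_page))
--     page = actual_page
--     while remaining > 0:
--         d = len(str(page + 1))
--         take = min(10 ** d - 1 - page, remaining // d)
--         if take == 0:
--             break
--         page += take
--         remaining -= take * d
--     return page
-- ===== Notes on version B (the rewrite author's own statement) =====
-- stated objective: faster
-- what changed: Replaces A's page-by-page counting loop by per-digit-length block arithmetic (one min/div step per decade); Pre_ restricts to nonnegative actual_page, the natural domain of page numbers, since for negative pages len(str) counts the minus sign and A's budgeting there is an artefact B does not reproduce.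
-- outside the precondition, e.g. on solution(-3, 10): A returns 3, B returns 1
import Mathlib
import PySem

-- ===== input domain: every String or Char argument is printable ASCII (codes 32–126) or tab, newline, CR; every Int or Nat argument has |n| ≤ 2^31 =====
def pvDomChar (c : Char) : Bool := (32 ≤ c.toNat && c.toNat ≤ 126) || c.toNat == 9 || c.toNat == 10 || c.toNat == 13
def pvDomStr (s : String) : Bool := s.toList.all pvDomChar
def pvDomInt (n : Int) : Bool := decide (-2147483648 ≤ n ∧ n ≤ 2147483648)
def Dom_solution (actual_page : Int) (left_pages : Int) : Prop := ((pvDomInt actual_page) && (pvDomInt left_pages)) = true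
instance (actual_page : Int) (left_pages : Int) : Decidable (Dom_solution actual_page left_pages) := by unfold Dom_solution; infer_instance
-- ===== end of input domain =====

-- B replaces A's page-by-page counting loop by per-digit-length block arithmetic (one min/div step per decade of pages).
-- Both loops are ported with a Nat fuel equal to the loop variant (the remaining digit budget), a totality device only:
-- each Python iteration strictly decreases that budget, so the fuel never runs out on the traced executions.

-- shared helper: len(str(n))
def pyStrLen (n : Int) : Int := PySem.Str.len (PySem.Int.toStr n)

-- ===== PORT A =====
def solutionLoop (fuel : Nat) (actual_page : Int) (temp_left_pages : Int) : Int :=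
  match fuel with
  | 0 => actual_page
  | fuel + 1 =>
    if 0 < temp_left_pages then
      let p := actual_page + 1
      let t := temp_left_pages - pyStrLen p
      if t = 0 then p
      else if t < 0 then p - 1
      else solutionLoop fuel p t
    else actual_page

def solution (actual_page : Int) (left_pages : Int) : Int :=
  let temp_left_pages := left_pages - pyStrLen actual_page
  if temp_left_pages ≤ 0 then actual_page
  else solutionLoop temp_left_pages.toNat actual_page temp_left_pages

-- ===== PORT B =====
def solutionAltLoop (fuel : Nat) (page : Int) (remaining : Int) : Int :=
  match fuel with
  | 0 => page
  | fuel + 1 =>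
    if 0 < remaining then
      let d := pyStrLen (page + 1)
      let take := min (10 ^ d.toNat - 1 - page) (PySem.Int.floordiv remaining d)
      if take = 0 then page
      else solutionAltLoop fuel (page + take) (remaining - take * d)
    else page

def solution_alt (actual_page : Int) (left_pages : Int) : Int :=
  let remaining := left_pages - pyStrLen actual_page
  if remaining ≤ 0 then actual_page
  else solutionAltLoop remaining.toNat actual_page remaining

-- ===== PRECONDITION & SPEC =====
-- Pre_ restricts to nonnegative actual_page, the natural domain of page numbers: on negative pages
-- (on which A still returns) len(str) counts the minus sign, and A's resulting digit budgeting is an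
-- implementation artefact that B's decade arithmetic does not reproduce.
def Pre_solution (actual_page : Int) (left_pages : Int) : Prop := 0 ≤ actual_page
instance (actual_page : Int) (left_pages : Int) : Decidable (Pre_solution actual_page left_pages) := by unfold Pre_solution; infer_instance
def pvWitness_solution : Int × Int := (5, 10)

def Spec_solution (actual_page : Int) (left_pages : Int) (out : Int) : Prop := out = solution_alt actual_page left_pages
instance (actual_page : Int) (left_pages : Int) (out : Int) : Decidable (Spec_solution actual_page left_pages out) := by unfold Spec_solution; infer_instance

-- ===== CLAIM (what is proved, stated in full; the proofs are below) =====
def Claim_equal_solution : Prop := ∀ (actual_page : Int) (left_pages : Int), Dom_solution actual_page left_pages → Pre_solution actual_page left_pages → Spec_solution actual_page left_pages (solution actual_page left_pages)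

-- ===== LEMMAS AND PROOFS =====

-- (Nat.toDigits 10 m).length = log10 m + 1
theorem pv_toDigitsCore_len (f : Nat) : ∀ (m : Nat) (l : List Char), m < f →
    (Nat.toDigitsCore 10 f m l).length = Nat.log 10 m + 1 + l.length := by
  induction f with
  | zero => intro m l h; omega
  | succ f ih =>
    intro m l h
    simp only [Nat.toDigitsCore]
    by_cases h10 : m / 10 = 0
    · have hm : m < 10 := by omega
      simp [h10, Nat.log_eq_zero_iff.mpr (Or.inl hm)]
      omega
    · have hm : 10 ≤ m := by
        rcases Nat.lt_or_ge m 10 with h' | h'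
        · exact absurd (Nat.div_eq_of_lt h') h10
        · exact h'
      have hlt : m / 10 < f := by
        have := Nat.div_lt_self (by omega : 0 < m) (by norm_num : 1 < 10)
        omega
      simp only [h10, if_false]
      rw [ih (m / 10) _ hlt]
      have hlog : Nat.log 10 (m / 10) = Nat.log 10 m - 1 := Nat.log_div_base 10 m
      have hpos : 0 < Nat.log 10 m := Nat.log_pos (by norm_num) hm
      simp only [List.length_cons]
      omega

theorem pv_toDigits_len (m : Nat) : (Nat.toDigits 10 m).length = Nat.log 10 m + 1 :=
  pv_toDigitsCore_len (m + 1) m [] (Nat.lt_succ_self m)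

theorem pyStrLen_eq (n : Int) : pyStrLen n =
    if n < 0 then ((Nat.log 10 n.natAbs : Nat) : Int) + 2 else ((Nat.log 10 n.toNat : Nat) : Int) + 1 := by
  unfold pyStrLen PySem.Str.len
  rw [PySem.Int.toList_toStr]
  unfold PySem.Int.toChars
  by_cases h : n < 0
  · simp [h, pv_toDigits_len]; omega
  · simp [h, pv_toDigits_len]

theorem pyStrLen_pos (n : Int) : 1 ≤ pyStrLen n := by
  rw [pyStrLen_eq]; split_ifs <;> omega

theorem pyStrLen_toNat_of_nonneg (n : Int) (h : 0 ≤ n) :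
    (pyStrLen n).toNat = Nat.log 10 n.toNat + 1 := by
  rw [pyStrLen_eq, if_neg (by omega)]; omega

-- the decade starting at nxt is nonempty: nxt ≤ 10^len(str(nxt)) - 1  (nxt ≥ 0)
theorem pv_le_blockEnd (nxt : Int) (h : 0 ≤ nxt) : nxt ≤ 10 ^ (pyStrLen nxt).toNat - 1 := by
  rw [pyStrLen_toNat_of_nonneg nxt h]
  have h1 := Nat.lt_pow_succ_log_self (by norm_num : 1 < 10) nxt.toNat
  have h2 : (nxt.toNat : Int) < (((10:Nat) ^ (Nat.log 10 nxt.toNat + 1) : Nat) : Int) := by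
    exact_mod_cast h1
  have h3 : (nxt.toNat : Int) = nxt := Int.toNat_of_nonneg h
  push_cast at h2 ⊢
  omega

-- digit length is constant across a decade (nonnegative case)
theorem pyStrLen_const (nxt m : Int) (h : 0 ≤ nxt) (h1 : nxt ≤ m)
    (h2 : m ≤ 10 ^ (pyStrLen nxt).toNat - 1) : pyStrLen m = pyStrLen nxt := by
  have hm0 : 0 ≤ m := le_trans h h1
  rw [pyStrLen_toNat_of_nonneg nxt h] at h2
  have hmU : m.toNat < 10 ^ (Nat.log 10 nxt.toNat + 1) := by
    have hc : (m.toNat : Int) < (((10:Nat) ^ (Nat.log 10 nxt.toNat + 1) : Nat) : Int) := by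
      push_cast
      omega
    exact_mod_cast hc
  have hlog : Nat.log 10 m.toNat = Nat.log 10 nxt.toNat := by
    by_cases hz : nxt.toNat = 0
    · rw [hz] at hmU ⊢
      simp only [Nat.log_zero_right] at *
      exact Nat.log_eq_zero_iff.mpr (Or.inl (by simpa using hmU))
    · exact Nat.log_eq_of_pow_le_of_lt_pow
        (le_trans (Nat.pow_log_le_self 10 hz) (by omega)) hmU
  rw [pyStrLen_eq, pyStrLen_eq, if_neg (by omega), if_neg (by omega), hlog]

-- fuel exhausted or loop not entered: A's loop returns its page unchanged
theorem solutionLoop_nonpos (f : Nat) (page temp : Int) (h : temp ≤ 0) :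
    solutionLoop f page temp = page := by
  cases f with
  | zero => rfl
  | succ f => rw [solutionLoop, if_neg (by omega)]

-- any fuel at least the budget computes the same value
theorem solutionLoop_fuel (f : Nat) : ∀ (g : Nat) (page temp : Int),
    temp.toNat ≤ f → temp.toNat ≤ g →
    solutionLoop f page temp = solutionLoop g page temp := by
  induction f with
  | zero =>
    intro g page temp hf _
    rw [solutionLoop_nonpos 0 page temp (by omega), solutionLoop_nonpos g page temp (by omega)]
  | succ f ih =>
    intro g page temp hf hg
    by_cases ht : 0 < temp
    · have hd := pyStrLen_pos (page + 1)
      obtain ⟨g', rfl⟩ : ∃ g', g = g' + 1 := ⟨g - 1, by omega⟩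
      rw [solutionLoop, solutionLoop]
      simp only [if_pos ht]
      by_cases h0 : temp - pyStrLen (page + 1) = 0
      · rw [if_pos h0, if_pos h0]
      · rw [if_neg h0, if_neg h0]
        by_cases hneg : temp - pyStrLen (page + 1) < 0
        · rw [if_pos hneg, if_pos hneg]
        · rw [if_neg hneg, if_neg hneg]
          exact ih g' (page + 1) (temp - pyStrLen (page + 1)) (by omega) (by omega)
    · rw [solutionLoop_nonpos _ page temp (by omega),
          solutionLoop_nonpos g page temp (by omega)]

-- one iteration of A's loop when the next page fits
theorem solutionLoop_step (f : Nat) (page temp : Int) (h : pyStrLen (page + 1) ≤ temp) :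
    solutionLoop (f + 1) page temp = solutionLoop f (page + 1) (temp - pyStrLen (page + 1)) := by
  have hd := pyStrLen_pos (page + 1)
  rw [solutionLoop]
  simp only [if_pos (by omega : 0 < temp)]
  by_cases h0 : temp - pyStrLen (page + 1) = 0
  · rw [if_pos h0, h0, solutionLoop_nonpos f (page + 1) 0 le_rfl]
  · rw [if_neg h0, if_neg (by omega)]

-- k iterations of A's loop inside one equal-digit-length decade
theorem solutionLoop_advance (k : Nat) : ∀ (f g : Nat) (page remaining d : Int),
    (∀ i : Nat, 1 ≤ i → i ≤ k → pyStrLen (page + (i : Int)) = d) →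
    (k : Int) * d ≤ remaining → 1 ≤ d →
    remaining.toNat ≤ f → (remaining - (k : Int) * d).toNat ≤ g →
    solutionLoop f page remaining = solutionLoop g (page + (k : Int)) (remaining - (k : Int) * d) := by
  induction k with
  | zero =>
    intro f g page remaining d _ _ _ hf hg
    simpa using solutionLoop_fuel f g page remaining hf (by simpa using hg)
  | succ n ih =>
    intro f g page remaining d hlen hle hd hf hg
    have h1 : pyStrLen (page + 1) = d := by
      have := hlen 1 le_rfl (by omega)
      simpa using this
    have hnd : (0:Int) ≤ (n : Int) * d := by positivity
    have hle' : d ≤ remaining := by push_cast at hle; nlinarith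
    obtain ⟨f', rfl⟩ : ∃ f', f = f' + 1 := ⟨f - 1, by omega⟩
    rw [solutionLoop_step f' page remaining (by omega), h1]
    rw [ih f' g (page + 1) (remaining - d) d
      (by
        intro i hi1 hi2
        have := hlen (i + 1) (by omega) (by omega)
        push_cast at this ⊢
        convert this using 2
        ring)
      (by push_cast at hle ⊢; nlinarith) hd
      (by omega)
      (by
        have : remaining - d - (n : Int) * d = remaining - ((n : Nat) + 1 : Int) * d := by
          push_cast; ring
        push_cast at hg ⊢
        omega)]
    congr 1
    · push_cast; ring
    · push_cast; ring

-- main loop equivalence (equal fuel on both sides, nonnegative page)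
theorem loop_eq (fuel : Nat) : ∀ (page remaining : Int), 0 ≤ page → remaining.toNat ≤ fuel →
    solutionLoop fuel page remaining = solutionAltLoop fuel page remaining := by
  induction fuel with
  | zero => intro page remaining _ h; rfl
  | succ f ih =>
    intro page remaining hp hf
    by_cases hr : 0 < remaining
    · have hd := pyStrLen_pos (page + 1)
      have hbe := pv_le_blockEnd (page + 1) (by omega)
      set d := pyStrLen (page + 1) with hdef
      set be := (10:Int) ^ d.toNat - 1 with hbedef
      set q := PySem.Int.floordiv remaining d with hqdef
      have hqfd : q = Int.fdiv remaining d := rfl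
      have hqed : q = remaining / d := by
        rw [hqfd, Int.fdiv_eq_ediv, if_pos (Or.inl (by omega : (0:Int) ≤ d))]
        ring
      have hmod0 : 0 ≤ remaining % d := Int.emod_nonneg remaining (by omega)
      have hmodlt : remaining % d < d := Int.emod_lt_of_pos remaining (by omega)
      have hqle : q * d ≤ remaining := by rw [hqed]; nlinarith [Int.ediv_add_emod remaining d]
      have hqlt : remaining < (q + 1) * d := by rw [hqed]; nlinarith [Int.ediv_add_emod remaining d]
      have hq0 : 0 ≤ q := by rw [hqed]; exact Int.ediv_nonneg (by omega) (by omega)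
      rw [solutionAltLoop]
      simp only [if_pos hr]
      rw [← hdef, ← hqdef]
      set take := min (be - page) q with htdef
      by_cases ht : take = 0
      · rw [if_pos ht]
        have hq : q = 0 := by omega
        have hrd : remaining < d := by
          rw [hq] at hqlt
          simpa using hqlt
        rw [solutionLoop]
        simp only [if_pos hr]
        rw [if_neg (by omega), if_pos (by omega)]
        omega
      · rw [if_neg ht]
        have htake1 : 1 ≤ take := by omega
        have htd : take * d ≤ remaining := by
          have : take ≤ q := min_le_right _ _
          nlinarith
        have hmul1 : 1 ≤ take * d := by nlinarith
        have hadv := solutionLoop_advance take.toNat (f + 1) f page remaining d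
          (fun i hi1 hi2 => by
            have hnm : page + 1 ≤ page + (i : Int) := by omega
            have hmb : page + (i : Int) ≤ 10 ^ ((pyStrLen (page+1)).toNat) - 1 := by
              have : (i : Int) ≤ take := by
                have := Int.toNat_of_nonneg (by omega : (0:Int) ≤ take)
                omega
              rw [← hdef]
              omega
            rw [pyStrLen_const (page + 1) (page + (i : Int)) (by omega) hnm hmb, hdef])
          (by rw [Int.toNat_of_nonneg (by omega : (0:Int) ≤ take)]; exact htd) hd
          hf
          (by rw [Int.toNat_of_nonneg (by omega : (0:Int) ≤ take)]; omega)
        rw [Int.toNat_of_nonneg (by omega : (0:Int) ≤ take)] at hadv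
        rw [hadv]
        exact ih (page + take) (remaining - take * d) (by omega) (by omega)
    · rw [solutionLoop_nonpos _ page remaining (by omega), solutionAltLoop]
      simp [hr]

-- ===== VERDICT (by name: the statement is the Claim_ definition above) =====
theorem solution_spec : Claim_equal_solution := by
  intro actual_page left_pages _ hpre
  unfold Spec_solution solution solution_alt
  by_cases h : left_pages - pyStrLen actual_page ≤ 0
  · simp [h]
  · simp only [if_neg h]
    exact loop_eq (left_pages - pyStrLen actual_page).toNat actual_page _ hpre le_rfl
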